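-- pv_equiv track=rewrite | github.com/PaperExp/IWT_dedup | liu_fuzzy.py | is_fuzzy_exist
-- ===== SOURCE A (Python) =====
-- def is_fuzzy_exist(hash : int, tar_dict : dict, dist : int) -> bool:
--     i = 0
--     exist = False
--     while i <= dist and not exist:
--         if hash - i in tar_dict.keys():
--             exist = True
--         if hash + i in tar_dict.keys():
--             exist = True
--         i += 1
--     return exist
-- ===== SOURCE B (Python) =====
-- def is_fuzzy_exist(hash: int, tar_dict: dict, dist: int) -> bool:
--     return any(abs(k - hash) <= dist for k in tar_dict)
-- ===== Notes on version B (the rewrite author's own statement) =====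
-- stated objective: idiomatic
-- what changed: Replaces the offset-probing while-loop (testing hash-i and hash+i for i = 0..dist against the dict's keys) with a single linear scan over the dict's existing keys applying the distance predicate abs(k - hash) <= dist.
import Mathlib
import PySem

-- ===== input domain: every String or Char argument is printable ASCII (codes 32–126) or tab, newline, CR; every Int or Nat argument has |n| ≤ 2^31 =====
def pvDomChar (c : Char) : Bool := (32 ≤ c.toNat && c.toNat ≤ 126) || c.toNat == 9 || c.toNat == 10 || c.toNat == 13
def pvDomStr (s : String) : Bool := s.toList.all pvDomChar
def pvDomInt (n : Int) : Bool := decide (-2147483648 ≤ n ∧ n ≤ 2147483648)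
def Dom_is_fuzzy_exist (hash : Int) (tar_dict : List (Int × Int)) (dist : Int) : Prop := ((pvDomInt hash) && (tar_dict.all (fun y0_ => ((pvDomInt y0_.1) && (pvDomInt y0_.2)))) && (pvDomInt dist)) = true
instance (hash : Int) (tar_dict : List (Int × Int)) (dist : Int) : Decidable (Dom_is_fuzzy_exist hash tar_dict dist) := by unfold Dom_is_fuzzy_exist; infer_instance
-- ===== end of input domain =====

-- B replaces A's offset-probing loop (membership tests of hash±i for i = 0..dist)
-- with one linear scan of the dict's keys under the predicate |k - hash| ≤ dist (idiomatic).

-- ===== PORT A =====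
-- the while-loop: i counts from 0 while i ≤ dist and not exist; each step probes hash-i and hash+i
def fuzzyLoop (hash : Int) (keys : List Int) (dist : Int) (i : Int) (exist : Bool) : Bool :=
  if i ≤ dist ∧ exist = false then
    let exist1 := if keys.contains (hash - i) then true else exist
    let exist2 := if keys.contains (hash + i) then true else exist1
    fuzzyLoop hash keys dist (i + 1) exist2
  else exist
termination_by (dist + 1 - i).toNat
decreasing_by omega

def is_fuzzy_exist (hash : Int) (tar_dict : List (Int × Int)) (dist : Int) : Bool :=
  fuzzyLoop hash (tar_dict.map Prod.fst) dist 0 false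

-- ===== PORT B =====
def is_fuzzy_exist_alt (hash : Int) (tar_dict : List (Int × Int)) (dist : Int) : Bool :=
  tar_dict.any (fun p => decide (|p.1 - hash| ≤ dist))

-- ===== PRECONDITION & SPEC =====
def Spec_is_fuzzy_exist (hash : Int) (tar_dict : List (Int × Int)) (dist : Int) (out : Bool) : Prop := out = is_fuzzy_exist_alt hash tar_dict dist
instance (hash : Int) (tar_dict : List (Int × Int)) (dist : Int) (out : Bool) : Decidable (Spec_is_fuzzy_exist hash tar_dict dist out) := by unfold Spec_is_fuzzy_exist; infer_instance

-- ===== CLAIM (what is proved, stated in full; the proofs are below) =====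
def Claim_equal_is_fuzzy_exist : Prop := ∀ (hash : Int) (tar_dict : List (Int × Int)) (dist : Int), Dom_is_fuzzy_exist hash tar_dict dist → Spec_is_fuzzy_exist hash tar_dict dist (is_fuzzy_exist hash tar_dict dist)

-- ===== LEMMAS AND PROOFS =====

-- the "rest of the probing" predicate: some key lies at signed distance j from hash with i ≤ j ≤ dist
def probeRest (hash : Int) (keys : List Int) (dist i : Int) : Bool :=
  keys.any (fun k => decide ((i ≤ hash - k ∧ hash - k ≤ dist) ∨ (i ≤ k - hash ∧ k - hash ≤ dist)))

theorem fuzzyLoop_eq (hash : Int) (keys : List Int) (dist : Int) :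
    ∀ (n : Nat) (i : Int) (exist : Bool), (dist + 1 - i).toNat ≤ n →
      fuzzyLoop hash keys dist i exist = (exist || probeRest hash keys dist i) := by
  intro n
  induction n with
  | zero =>
    intro i exist h
    have hgt : ¬ i ≤ dist := by omega
    rw [fuzzyLoop, if_neg (by simp [hgt])]
    have hfalse : probeRest hash keys dist i = false := by
      simp only [probeRest, List.any_eq_false]
      intro k _
      simp only [decide_eq_true_eq]
      omega
    simp [hfalse]
  | succ n ih =>
    intro i exist h
    by_cases hle : i ≤ dist
    · cases exist with
      | true =>
        rw [fuzzyLoop]; simp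
      | false =>
        rw [fuzzyLoop, if_pos ⟨hle, rfl⟩, ih (i + 1) _ (by omega)]
        have hpt : probeRest hash keys dist i =
            (keys.contains (hash - i) || keys.contains (hash + i) || probeRest hash keys dist (i + 1)) := by
          rw [Bool.eq_iff_iff]
          simp only [probeRest, List.contains_eq_any_beq, List.any_eq_true, Bool.or_eq_true,
            beq_iff_eq, decide_eq_true_eq]
          constructor
          · rintro ⟨k, hk, hcond⟩
            by_cases h1 : hash - k = i
            · exact Or.inl (Or.inl ⟨k, hk, by omega⟩)
            by_cases h2 : k - hash = i
            · exact Or.inl (Or.inr ⟨k, hk, by omega⟩)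
            · exact Or.inr ⟨k, hk, by omega⟩
          · rintro ((⟨k, hk, e⟩ | ⟨k, hk, e⟩) | ⟨k, hk, hc⟩) <;> exact ⟨k, hk, by omega⟩
        rw [hpt]
        cases hc1 : keys.contains (hash - i) <;> cases hc2 : keys.contains (hash + i) <;> simp
    · rw [fuzzyLoop, if_neg (by simp [hle])]
      have hfalse : probeRest hash keys dist i = false := by
        simp only [probeRest, List.any_eq_false]
        intro k _
        simp only [decide_eq_true_eq]
        omega
      simp [hfalse]

-- ===== VERDICT (by name: the statement is the Claim_ definition above) =====
theorem is_fuzzy_exist_spec : Claim_equal_is_fuzzy_exist := by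
  intro hash tar_dict dist _
  unfold Spec_is_fuzzy_exist is_fuzzy_exist is_fuzzy_exist_alt
  rw [fuzzyLoop_eq hash (tar_dict.map Prod.fst) dist (dist + 1 - 0).toNat 0 false (le_refl _)]
  simp only [Bool.false_or, probeRest, List.any_map, Function.comp_def]
  apply List.any_congr rfl
  intro p
  rw [Bool.eq_iff_iff]
  simp only [decide_eq_true_eq, abs_le]
  omega
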